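-- pv_equiv track=rewrite | github.com/Dhruvpatel50/Wealth-Scribe | wealth-scribe-master/flaskapi-main/app.py | extract_financial_values
-- ===== SOURCE A (Python) =====
-- RT = {
--     "revenue from operations": 1, "Total Revenue": 2, "Turnover": 3, "Net Sales": 4,
--     "Gross Revenue": 5, "Operating Revenue": 6, "Revenues": 7, "Receipts": 8,
--     "Income from Operations": 9, "Business Income": 10, "Gross Sales": 11
-- }
--
-- OPT = {
--     "Operating Profit": 1, "EBIT": 2, "Earnings Before Interest and Tax": 3, "Profit Before Tax": 4,
--     "PBIT": 5, "Operating Income": 6, "Operating Earnings": 7, "Core Earnings": 8,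
--     "NOP": 9, "NOPAT": 10, "Operating Margin": 11, "Pre-Tax Operating Profit": 12
-- }
--
-- NPT = {
--     "Net Profit": 1, "Net Income": 2, "Profit After Tax": 3, "PAT": 4,
--     "Earnings After Tax": 5, "Final Profit": 6, "Net Earnings": 7,
--     "Total Comprehensive Income": 8, "Post-Tax Profit": 9
-- }
--
-- def extract_financial_values(table):
--     """Extract financial values for current quarter and annual data."""
--     extracted_data = {
--         "Current Quarter": {"Revenue": None, "Operating Profit": None, "Net Profit": None},
--         "Annual Data": {"Revenue": None, "Operating Profit": None, "Net Profit": None}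
--     }
--
--     if not table:
--         return extracted_data
--
--     header = table[0]
--     current_quarter_col_index = None
--     previous_quarter_col_index = None
--     annual_col_index = None
--
--     for i, cell in enumerate(header):
--         if cell and "Particular" in str(cell):
--             current_quarter_col_index = i + 1
--         if cell and "ended" in str(cell).lower():
--             previous_quarter_col_index = i - 1
--         if cell and "year ended" in str(cell).lower():
--             annual_col_index = i
--
--     if current_quarter_col_index is None or annual_col_index is None:
--         return extracted_data
--
--     def select_highest_priority(term_dict, row_text):
--         if row_text is None:
--             return None
--         matches = [(term, priority) for term, priority in term_dict.items() if term.lower() in row_text.lower()]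
--         return min(matches, key=lambda x: x[1])[0] if matches else None
--
--     for row in table:
--         if not row or row[0] is None:
--             continue
--
--         revenue_match = select_highest_priority(RT, row[0])
--         op_profit_match = select_highest_priority(OPT, row[0])
--         net_profit_match = select_highest_priority(NPT, row[0])
--
--         if revenue_match:
--             extracted_data["Current Quarter"]["Revenue"] = row[current_quarter_col_index] if current_quarter_col_index < len(row) else None
--             extracted_data["Annual Data"]["Revenue"] = row[annual_col_index] if annual_col_index < len(row) else None
--         if op_profit_match:
--             extracted_data["Current Quarter"]["Operating Profit"] = row[current_quarter_col_index] if current_quarter_col_index < len(row) else None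
--             extracted_data["Annual Data"]["Operating Profit"] = row[annual_col_index] if annual_col_index < len(row) else None
--         if net_profit_match:
--             extracted_data["Current Quarter"]["Net Profit"] = row[current_quarter_col_index] if current_quarter_col_index < len(row) else None
--             extracted_data["Annual Data"]["Net Profit"] = row[annual_col_index] if annual_col_index < len(row) else None
--
--     return extracted_data
-- ===== SOURCE B (Python) =====
-- RT = {
--     "revenue from operations": 1, "Total Revenue": 2, "Turnover": 3, "Net Sales": 4,
--     "Gross Revenue": 5, "Operating Revenue": 6, "Revenues": 7, "Receipts": 8,
--     "Income from Operations": 9, "Business Income": 10, "Gross Sales": 11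
-- }
--
-- OPT = {
--     "Operating Profit": 1, "EBIT": 2, "Earnings Before Interest and Tax": 3, "Profit Before Tax": 4,
--     "PBIT": 5, "Operating Income": 6, "Operating Earnings": 7, "Core Earnings": 8,
--     "NOP": 9, "NOPAT": 10, "Operating Margin": 11, "Pre-Tax Operating Profit": 12
-- }
--
-- NPT = {
--     "Net Profit": 1, "Net Income": 2, "Profit After Tax": 3, "PAT": 4,
--     "Earnings After Tax": 5, "Final Profit": 6, "Net Earnings": 7,
--     "Total Comprehensive Income": 8, "Post-Tax Profit": 9
-- }
--
-- FIELDS = ("Revenue", "Operating Profit", "Net Profit")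
--
--
-- def extract_financial_values(table):
--     """Extract financial values for current quarter and annual data."""
--     empty = {"Current Quarter": dict.fromkeys(FIELDS),
--              "Annual Data": dict.fromkeys(FIELDS)}
--     if not table:
--         return empty
--
--     # header phase: last header cell containing each marker wins
--     p_hits = [i for i, c in enumerate(table[0]) if c and "Particular" in str(c)]
--     y_hits = [i for i, c in enumerate(table[0]) if c and "year ended" in str(c).lower()]
--     if not p_hits or not y_hits:
--         return empty
--     cq, ann = p_hits[-1] + 1, y_hits[-1]
--
--     def last_row(terms):
--         # last matching row wins = first match scanning from the end
--         lows = [t.lower() for t in terms]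
--         for row in reversed(table):
--             if row and row[0] is not None:
--                 text = str(row[0]).lower()
--                 if any(t in text for t in lows):
--                     return row
--         return None
--
--     def cell(row, i):
--         return row[i] if i < len(row) else None
--
--     vals = []
--     for field, terms in zip(FIELDS, (RT, OPT, NPT)):
--         row = last_row(terms)
--         vals.append((field,
--                      cell(row, cq) if row is not None else None,
--                      cell(row, ann) if row is not None else None))
--     return {"Current Quarter": {f: q for f, q, _ in vals},
--             "Annual Data": {f: a for f, _, a in vals}}
-- ===== Notes on version B (the rewrite author's own statement) =====
-- stated objective: simpler
-- what changed: Replaces A's forward overwrite loops over a mutable result dict (header indices set by repeated reassignment, rows matched via a select-highest-priority helper whose min() result is only used as a boolean) by comprehension-style phases: the two header columns are the last elements of filtered index lists, and each field is filled independently by a single find-first-from-the-end row search with a plain any() membership test.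
import Mathlib
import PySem

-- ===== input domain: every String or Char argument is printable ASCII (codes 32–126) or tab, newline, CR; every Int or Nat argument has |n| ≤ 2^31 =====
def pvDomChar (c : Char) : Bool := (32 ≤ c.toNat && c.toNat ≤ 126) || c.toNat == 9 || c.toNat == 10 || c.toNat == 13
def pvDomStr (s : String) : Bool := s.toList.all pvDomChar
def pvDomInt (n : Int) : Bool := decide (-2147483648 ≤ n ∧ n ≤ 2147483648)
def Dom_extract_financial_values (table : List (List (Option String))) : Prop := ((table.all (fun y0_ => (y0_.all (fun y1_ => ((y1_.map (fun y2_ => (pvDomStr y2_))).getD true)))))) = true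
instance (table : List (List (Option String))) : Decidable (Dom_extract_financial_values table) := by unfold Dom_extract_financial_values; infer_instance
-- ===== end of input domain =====

-- B replaces A's forward overwrite loops (mutable result dict, priority-min helper used only as a
-- boolean) by comprehension-style phases: header indices collected with filter + last element, and
-- per field a single find-first-from-the-end row search; objective: simpler.

-- ===== PORT A =====

-- the module constants RT / OPT / NPT as association lists

def pvRT : List (String × Int) :=
  [("revenue from operations", 1), ("Total Revenue", 2), ("Turnover", 3), ("Net Sales", 4),
   ("Gross Revenue", 5), ("Operating Revenue", 6), ("Revenues", 7), ("Receipts", 8),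
   ("Income from Operations", 9), ("Business Income", 10), ("Gross Sales", 11)]

def pvOPT : List (String × Int) :=
  [("Operating Profit", 1), ("EBIT", 2), ("Earnings Before Interest and Tax", 3), ("Profit Before Tax", 4),
   ("PBIT", 5), ("Operating Income", 6), ("Operating Earnings", 7), ("Core Earnings", 8),
   ("NOP", 9), ("NOPAT", 10), ("Operating Margin", 11), ("Pre-Tax Operating Profit", 12)]

def pvNPT : List (String × Int) :=
  [("Net Profit", 1), ("Net Income", 2), ("Profit After Tax", 3), ("PAT", 4),
   ("Earnings After Tax", 5), ("Final Profit", 6), ("Net Earnings", 7),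
   ("Total Comprehensive Income", 8), ("Post-Tax Profit", 9)]

-- Python truthiness of an Optional[str] cell: None and "" are falsy
def pvTruthy (c : Option String) : Bool :=
  match c with
  | none => false
  | some s => !s.toList.isEmpty

-- row[i] if i < len(row) else None  (i ≥ 0 wherever used, so pyGet? is exact)
def pvCell (row : List (Option String)) (i : Int) : Option String :=
  if i < (row.length : Int) then (PySem.List.pyGet? row i).join else none

-- the empty result dict A starts from / returns early
def pvEmptyOut : List (String × List (String × Option String)) :=
  [("Current Quarter", [("Revenue", none), ("Operating Profit", none), ("Net Profit", none)]),
   ("Annual Data", [("Revenue", none), ("Operating Profit", none), ("Net Profit", none)])]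

-- one iteration of A's header loop; state = (current_quarter, previous_quarter, annual) column indices
def pvHeaderStepA (st : Option Int × Option Int × Option Int) (ic : Int × Option String) :
    Option Int × Option Int × Option Int :=
  let st1 := if pvTruthy ic.2 && PySem.Str.isIn "Particular" (ic.2.getD "") then
      (some (ic.1 + 1), st.2.1, st.2.2) else st
  let st2 := if pvTruthy ic.2 && PySem.Str.isIn "ended" (PySem.Str.lower (ic.2.getD "")) then
      (st1.1, some (ic.1 - 1), st1.2.2) else st1
  if pvTruthy ic.2 && PySem.Str.isIn "year ended" (PySem.Str.lower (ic.2.getD "")) then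
      (st2.1, st2.2.1, some ic.1) else st2

def selectHighestPriority (termDict : List (String × Int)) (rowText : Option String) : Option String :=
  match rowText with
  | none => none
  | some t =>
      let ms := termDict.filter
        (fun p => PySem.Str.isIn (PySem.Str.lower p.1) (PySem.Str.lower t))
      if ms.isEmpty then none
      else (PySem.List.min? ms (fun x => x.2)).map (fun x => x.1)

-- A's per-field accumulator: ((rev_q, rev_a), (op_q, op_a), (np_q, np_a))
def pvStateA : Type :=
  (Option String × Option String) × (Option String × Option String) × (Option String × Option String)

def pvRowStepA (cq ann : Int) (st : pvStateA) (row : List (Option String)) : pvStateA :=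
  match row with
  | [] => st
  | none :: _ => st
  | some t :: _ =>
      let rm := selectHighestPriority pvRT (some t)
      let om := selectHighestPriority pvOPT (some t)
      let nm := selectHighestPriority pvNPT (some t)
      let st := if pvTruthy rm then ((pvCell row cq, pvCell row ann), st.2.1, st.2.2) else st
      let st := if pvTruthy om then (st.1, (pvCell row cq, pvCell row ann), st.2.2) else st
      if pvTruthy nm then (st.1, st.2.1, (pvCell row cq, pvCell row ann)) else st

def extract_financial_values (table : List (List (Option String))) :
    List (String × List (String × Option String)) :=
  match table with
  | [] => pvEmptyOut
  | header :: _ =>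
      let h := (PySem.List.enumerate header).foldl pvHeaderStepA (none, none, none)
      match h.1, h.2.2 with
      | some cq, some ann =>
          let st := table.foldl (pvRowStepA cq ann) ((none, none), (none, none), (none, none))
          [("Current Quarter",
             [("Revenue", st.1.1), ("Operating Profit", st.2.1.1), ("Net Profit", st.2.2.1)]),
           ("Annual Data",
             [("Revenue", st.1.2), ("Operating Profit", st.2.1.2), ("Net Profit", st.2.2.2)])]
      | _, _ => pvEmptyOut

-- ===== PORT B =====

-- B's view of the module constants: only the keys matter (the priorities are never used)
def pvKeysR : List String :=
  ["revenue from operations", "Total Revenue", "Turnover", "Net Sales",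
   "Gross Revenue", "Operating Revenue", "Revenues", "Receipts",
   "Income from Operations", "Business Income", "Gross Sales"]

def pvKeysO : List String :=
  ["Operating Profit", "EBIT", "Earnings Before Interest and Tax", "Profit Before Tax",
   "PBIT", "Operating Income", "Operating Earnings", "Core Earnings",
   "NOP", "NOPAT", "Operating Margin", "Pre-Tax Operating Profit"]

def pvKeysN : List String :=
  ["Net Profit", "Net Income", "Profit After Tax", "PAT",
   "Earnings After Tax", "Final Profit", "Net Earnings",
   "Total Comprehensive Income", "Post-Tax Profit"]

-- `c and "Particular" in str(c)` — the comprehension filter of the header phase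
def pvHasParticular (c : Option String) : Bool :=
  match c with
  | none => false
  | some s => (PySem.Str.len s != 0) && PySem.Str.isIn "Particular" s

-- `c and "year ended" in str(c).lower()`
def pvHasYearEnded (c : Option String) : Bool :=
  match c with
  | none => false
  | some s => (PySem.Str.len s != 0) && PySem.Str.isIn "year ended" (PySem.Str.lower s)

-- `row and row[0] is not None and any(t in str(row[0]).lower() for t in lows)`
def pvMatchesRow (lows : List String) (row : List (Option String)) : Bool :=
  (row.head?.join).elim false
    (fun t => lows.any (fun w => PySem.Str.isIn w (PySem.Str.lower t)))

-- B's last_row: first matching row scanning from the end (loop with early return = find?)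
def pvLastRow (table : List (List (Option String))) (terms : List String) :
    Option (List (Option String)) :=
  let lows := terms.map PySem.Str.lower
  table.reverse.find? (pvMatchesRow lows)

-- B's cell(row, i) = row[i] if i < len(row) else None — exact for the Nat indices B uses
def pvNth (row : List (Option String)) (i : Nat) : Option String :=
  ((row.drop i).head?).join

-- dict.fromkeys(FIELDS) twice
def pvBlankB : List (String × Option String) :=
  ["Revenue", "Operating Profit", "Net Profit"].map (fun k => (k, none))

def extract_financial_values_alt (table : List (List (Option String))) :
    List (String × List (String × Option String)) :=
  if table.isEmpty then [("Current Quarter", pvBlankB), ("Annual Data", pvBlankB)]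
  else
    let pHits := ((table.headD []).zipIdx.filter (fun ci => pvHasParticular ci.1)).map (·.2)
    let yHits := ((table.headD []).zipIdx.filter (fun ci => pvHasYearEnded ci.1)).map (·.2)
    if pHits.isEmpty || yHits.isEmpty then
      [("Current Quarter", pvBlankB), ("Annual Data", pvBlankB)]
    else
      let cq := pHits.getLastD 0 + 1
      let ann := yHits.getLastD 0
      let vals := [("Revenue", pvKeysR), ("Operating Profit", pvKeysO), ("Net Profit", pvKeysN)].map
        (fun f => (f.1, (pvLastRow table f.2).elim ((none : Option String), (none : Option String))
            (fun row => (pvNth row cq, pvNth row ann))))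
      [("Current Quarter", vals.map (fun v => (v.1, v.2.1))),
       ("Annual Data", vals.map (fun v => (v.1, v.2.2)))]

-- ===== PRECONDITION & SPEC =====
def Spec_extract_financial_values (table : List (List (Option String))) (out : List (String × List (String × Option String))) : Prop := out = extract_financial_values_alt table
instance (table : List (List (Option String))) (out : List (String × List (String × Option String))) : Decidable (Spec_extract_financial_values table out) := by unfold Spec_extract_financial_values; infer_instance

-- ===== CLAIM =====
def Claim_equal_extract_financial_values : Prop := ∀ (table : List (List (Option String))), Dom_extract_financial_values table → Spec_extract_financial_values table (extract_financial_values table)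

-- ===== LEMMAS AND PROOFS =====

-- a fold that overwrites on every match equals the value at the last matching element
theorem foldl_last_match {α β : Type} (p : α → Bool) (v : α → β) (l : List α) :
    ∀ (s : β),
      l.foldl (fun s r => if p r then v r else s) s
        = match l.reverse.find? p with
          | some r => v r
          | none => s := by
  induction l with
  | nil => intro s; rfl
  | cons r l ih =>
      intro s
      simp only [List.foldl_cons, List.reverse_cons, List.find?_append]
      rw [ih]
      cases hf : l.reverse.find? p with
      | some r' => simp
      | none =>
          simp only [Option.none_or]
          cases hp : p r with
          | true => simp [List.find?, hp]
          | false => simp [List.find?, hp]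

-- last element of a filtered list = first match from the end
theorem getLast?_filter_eq_find?_reverse {α : Type} (p : α → Bool) (l : List α) :
    (l.filter p).getLast? = l.reverse.find? p := by
  rw [List.getLast?_eq_head?_reverse, ← List.filter_reverse, ← List.head?_filter]

-- B's truthiness test (len != 0) equals A's (!isEmpty on the char list)
theorem lenNe_eq_truthy (s : String) : (PySem.Str.len s != 0) = !s.toList.isEmpty := by
  rw [PySem.Str.len_eq]
  cases s.toList with
  | nil => simp
  | cons a l => simp; omega

-- the two "Particular" conditions agree
theorem hasParticular_eq (ic : Int × Option String) :
    (pvTruthy ic.2 && PySem.Str.isIn "Particular" (ic.2.getD "")) = pvHasParticular ic.2 := by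
  cases h : ic.2 with
  | none => rfl
  | some s =>
      simp only [pvTruthy, pvHasParticular]
      rw [← lenNe_eq_truthy]
      rfl

-- the two "year ended" conditions agree
theorem hasYearEnded_eq (ic : Int × Option String) :
    (pvTruthy ic.2 && PySem.Str.isIn "year ended" (PySem.Str.lower (ic.2.getD ""))) = pvHasYearEnded ic.2 := by
  cases h : ic.2 with
  | none => rfl
  | some s =>
      simp only [pvTruthy, pvHasYearEnded]
      rw [← lenNe_eq_truthy]
      rfl

-- A's header step, first component
theorem headerStepA_fst (st : Option Int × Option Int × Option Int) (ic : Int × Option String) :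
    (pvHeaderStepA st ic).1 = if pvHasParticular ic.2 then some (ic.1 + 1) else st.1 := by
  simp only [pvHeaderStepA, ← hasParticular_eq ic]
  split_ifs <;> rfl

-- A's header step, third component
theorem headerStepA_thd (st : Option Int × Option Int × Option Int) (ic : Int × Option String) :
    (pvHeaderStepA st ic).2.2 = if pvHasYearEnded ic.2 then some ic.1 else st.2.2 := by
  simp only [pvHeaderStepA, ← hasYearEnded_eq ic]
  split_ifs <;> rfl

theorem headerFoldA_fst (l : List (Int × Option String)) :
    ∀ (st : Option Int × Option Int × Option Int),
      (l.foldl pvHeaderStepA st).1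
        = l.foldl (fun s ic => if pvHasParticular ic.2 then some (ic.1 + 1) else s) st.1 := by
  induction l with
  | nil => intro st; rfl
  | cons ic l ih => intro st; simp only [List.foldl_cons]; rw [ih, headerStepA_fst]

theorem headerFoldA_thd (l : List (Int × Option String)) :
    ∀ (st : Option Int × Option Int × Option Int),
      (l.foldl pvHeaderStepA st).2.2
        = l.foldl (fun s ic => if pvHasYearEnded ic.2 then some ic.1 else s) st.2.2 := by
  induction l with
  | nil => intro st; rfl
  | cons ic l ih => intro st; simp only [List.foldl_cons]; rw [ih, headerStepA_thd]

-- A's truthiness test of select_highest_priority equals a plain any() membership test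
theorem truthy_select_eq_any (d : List (String × Int)) (hne : ∀ p ∈ d, p.1.toList ≠ []) (t : String) :
    pvTruthy (selectHighestPriority d (some t))
      = d.any (fun p => PySem.Str.isIn (PySem.Str.lower p.1) (PySem.Str.lower t)) := by
  simp only [selectHighestPriority]
  by_cases h : (d.filter (fun p => PySem.Str.isIn (PySem.Str.lower p.1) (PySem.Str.lower t))).isEmpty = true
  · rw [if_pos h]
    rw [List.isEmpty_iff, List.filter_eq_nil_iff] at h
    have hfalse : (d.any fun p => PySem.Str.isIn (PySem.Str.lower p.1) (PySem.Str.lower t)) = false := by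
      rw [List.any_eq_false]
      intro p hp
      simpa using h p hp
    simp only [pvTruthy]
    exact hfalse.symm
  · rw [if_neg h]
    have hfil : d.filter (fun p => PySem.Str.isIn (PySem.Str.lower p.1) (PySem.Str.lower t)) ≠ [] := by
      intro hc; rw [hc] at h; exact h (by rfl)
    obtain ⟨m, hm⟩ : ∃ m, PySem.List.min?
        (d.filter (fun p => PySem.Str.isIn (PySem.Str.lower p.1) (PySem.Str.lower t)))
        (fun x => x.2) = some m := by
      cases hmin : PySem.List.min?
          (d.filter (fun p => PySem.Str.isIn (PySem.Str.lower p.1) (PySem.Str.lower t)))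
          (fun x => x.2) with
      | none => exact absurd ((PySem.List.min?_eq_none_iff _ _).1 hmin) hfil
      | some m => exact ⟨m, rfl⟩
    have hmem := PySem.List.min?_mem hm
    have hmd := List.mem_of_mem_filter hmem
    have hcond := List.of_mem_filter hmem
    rw [hm]
    have : pvTruthy (some m.1) = true := by
      simp only [pvTruthy, Bool.not_eq_eq_eq_not, Bool.not_true, List.isEmpty_eq_false_iff]
      exact hne m hmd
    simp only [Option.map_some, this]
    symm
    rw [List.any_eq_true]
    exact ⟨m, hmd, hcond⟩

-- nonempty keys of the three literal dicts
theorem pvRT_keys_ne : ∀ p ∈ pvRT, p.1.toList ≠ [] := by decide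
theorem pvOPT_keys_ne : ∀ p ∈ pvOPT, p.1.toList ≠ [] := by decide
theorem pvNPT_keys_ne : ∀ p ∈ pvNPT, p.1.toList ≠ [] := by decide

theorem matchesRow_eq_any (d : List (String × Int)) (t : String) (rest : List (Option String)) :
    pvMatchesRow (d.map (fun p => PySem.Str.lower p.1)) (some t :: rest)
      = d.any (fun p => PySem.Str.isIn (PySem.Str.lower p.1) (PySem.Str.lower t)) := by
  simp [pvMatchesRow, List.any_map, Function.comp_def]

-- the three components of A's row step, each as a last-match-wins step
theorem rowStepA_fst (cq ann : Int) (st : pvStateA) (row : List (Option String)) :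
    (pvRowStepA cq ann st row).1
      = if pvMatchesRow (pvRT.map (fun p => PySem.Str.lower p.1)) row
          then (pvCell row cq, pvCell row ann) else st.1 := by
  match row with
  | [] => rfl
  | none :: _ => rfl
  | some t :: rest =>
      simp only [pvRowStepA, matchesRow_eq_any, ← truthy_select_eq_any pvRT pvRT_keys_ne t]
      split_ifs <;> rfl

theorem rowStepA_snd (cq ann : Int) (st : pvStateA) (row : List (Option String)) :
    (pvRowStepA cq ann st row).2.1
      = if pvMatchesRow (pvOPT.map (fun p => PySem.Str.lower p.1)) row
          then (pvCell row cq, pvCell row ann) else st.2.1 := by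
  match row with
  | [] => rfl
  | none :: _ => rfl
  | some t :: rest =>
      simp only [pvRowStepA, matchesRow_eq_any, ← truthy_select_eq_any pvOPT pvOPT_keys_ne t]
      split_ifs <;> rfl

theorem rowStepA_thd (cq ann : Int) (st : pvStateA) (row : List (Option String)) :
    (pvRowStepA cq ann st row).2.2
      = if pvMatchesRow (pvNPT.map (fun p => PySem.Str.lower p.1)) row
          then (pvCell row cq, pvCell row ann) else st.2.2 := by
  match row with
  | [] => rfl
  | none :: _ => rfl
  | some t :: rest =>
      simp only [pvRowStepA, matchesRow_eq_any, ← truthy_select_eq_any pvNPT pvNPT_keys_ne t]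
      split_ifs <;> rfl

-- A's triple fold, component by component
theorem foldA_fst (cq ann : Int) (l : List (List (Option String))) :
    ∀ (st : pvStateA),
      (l.foldl (pvRowStepA cq ann) st).1
        = l.foldl (fun s r => if pvMatchesRow (pvRT.map (fun p => PySem.Str.lower p.1)) r
            then (pvCell r cq, pvCell r ann) else s) st.1 := by
  induction l with
  | nil => intro st; rfl
  | cons r l ih => intro st; simp only [List.foldl_cons]; rw [ih, rowStepA_fst]

theorem foldA_snd (cq ann : Int) (l : List (List (Option String))) :
    ∀ (st : pvStateA),
      (l.foldl (pvRowStepA cq ann) st).2.1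
        = l.foldl (fun s r => if pvMatchesRow (pvOPT.map (fun p => PySem.Str.lower p.1)) r
            then (pvCell r cq, pvCell r ann) else s) st.2.1 := by
  induction l with
  | nil => intro st; rfl
  | cons r l ih => intro st; simp only [List.foldl_cons]; rw [ih, rowStepA_snd]

theorem foldA_thd (cq ann : Int) (l : List (List (Option String))) :
    ∀ (st : pvStateA),
      (l.foldl (pvRowStepA cq ann) st).2.2
        = l.foldl (fun s r => if pvMatchesRow (pvNPT.map (fun p => PySem.Str.lower p.1)) r
            then (pvCell r cq, pvCell r ann) else s) st.2.2 := by
  induction l with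
  | nil => intro st; rfl
  | cons r l ih => intro st; simp only [List.foldl_cons]; rw [ih, rowStepA_thd]

-- A's Int-indexed guarded lookup equals B's Nat drop/head lookup for nonnegative indices
theorem pvCell_natCast (row : List (Option String)) (n : Nat) :
    pvCell row (n : Int) = pvNth row n := by
  simp only [pvCell, pvNth, PySem.List.pyGet?_natCast]
  by_cases h : n < row.length
  · simp [h, List.head?_drop]
  · have : row.drop n = [] := List.drop_eq_nil_of_le (by omega)
    simp [h, this]

-- A's header components in B's filter/getLast? form (indices cast from B's Nat side)
theorem headerA_eq_B_fst (header : List (Option String)) :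
    ((PySem.List.enumerate header).foldl pvHeaderStepA (none, none, none)).1
      = ((((header.zipIdx.filter (fun ci => pvHasParticular ci.1)).map (·.2)).getLast?).map
          (fun (n : Nat) => ((n : Int) + 1))) := by
  rw [headerFoldA_fst, foldl_last_match, List.getLast?_map, getLast?_filter_eq_find?_reverse,
    PySem.List.enumerate_eq_zipIdx_map, ← List.map_reverse, List.find?_map]
  cases hf : header.zipIdx.reverse.find? ((fun ic => pvHasParticular ic.2) ∘ (fun p => ((0 : Int) + (p.2 : Int), p.1))) with
  | none =>
      have : header.zipIdx.reverse.find? (fun ci => pvHasParticular ci.1) = none := by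
        simpa [Function.comp_def] using hf
      simp [this]
  | some ci =>
      have : header.zipIdx.reverse.find? (fun ci => pvHasParticular ci.1) = some ci := by
        simpa [Function.comp_def] using hf
      simp [this]

theorem headerA_eq_B_thd (header : List (Option String)) :
    ((PySem.List.enumerate header).foldl pvHeaderStepA (none, none, none)).2.2
      = ((((header.zipIdx.filter (fun ci => pvHasYearEnded ci.1)).map (·.2)).getLast?).map
          (fun (n : Nat) => (n : Int))) := by
  rw [headerFoldA_thd, foldl_last_match, List.getLast?_map, getLast?_filter_eq_find?_reverse,
    PySem.List.enumerate_eq_zipIdx_map, ← List.map_reverse, List.find?_map]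
  cases hf : header.zipIdx.reverse.find? ((fun ic => pvHasYearEnded ic.2) ∘ (fun p => ((0 : Int) + (p.2 : Int), p.1))) with
  | none =>
      have : header.zipIdx.reverse.find? (fun ci => pvHasYearEnded ci.1) = none := by
        simpa [Function.comp_def] using hf
      simp [this]
  | some ci =>
      have : header.zipIdx.reverse.find? (fun ci => pvHasYearEnded ci.1) = some ci := by
        simpa [Function.comp_def] using hf
      simp [this]

-- ===== VERDICT =====
theorem extract_financial_values_spec : Claim_equal_extract_financial_values := by
  intro table _
  unfold Spec_extract_financial_values
  cases table with
  | nil => rfl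
  | cons header rest =>
      simp only [extract_financial_values, extract_financial_values_alt, List.isEmpty_cons,
        Bool.false_eq_true, if_false, List.headD_cons]
      rw [headerA_eq_B_fst, headerA_eq_B_thd]
      cases hp : ((header.zipIdx.filter (fun ci => pvHasParticular ci.1)).map (·.2)).getLast? with
      | none =>
          have hpe : ((header.zipIdx.filter (fun ci => pvHasParticular ci.1)).map (·.2)).isEmpty = true := by
            rw [List.isEmpty_iff, ← List.getLast?_eq_none_iff, hp]
          rw [hpe]
          cases hy : ((header.zipIdx.filter (fun ci => pvHasYearEnded ci.1)).map (·.2)).getLast? <;>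
            simp only [Option.map_none, Option.map_some, Bool.true_or, if_pos] <;> rfl
      | some p =>
          have hpe : ((header.zipIdx.filter (fun ci => pvHasParticular ci.1)).map (·.2)).isEmpty = false := by
            rw [List.isEmpty_eq_false_iff]
            intro hc; rw [hc] at hp; simp at hp
          have hgp : ((header.zipIdx.filter (fun ci => pvHasParticular ci.1)).map (·.2)).getLastD 0 = p := by
            rw [List.getLastD_eq_getLast?, hp]; rfl
          cases hy : ((header.zipIdx.filter (fun ci => pvHasYearEnded ci.1)).map (·.2)).getLast? with
          | none =>
              have hye : ((header.zipIdx.filter (fun ci => pvHasYearEnded ci.1)).map (·.2)).isEmpty = true := by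
                rw [List.isEmpty_iff, ← List.getLast?_eq_none_iff, hy]
              rw [hpe, hye]
              simp only [Option.map_none, Option.map_some, Bool.or_true, if_pos]
              rfl
          | some y =>
              have hye : ((header.zipIdx.filter (fun ci => pvHasYearEnded ci.1)).map (·.2)).isEmpty = false := by
                rw [List.isEmpty_eq_false_iff]
                intro hc; rw [hc] at hy; simp at hy
              have hgy : ((header.zipIdx.filter (fun ci => pvHasYearEnded ci.1)).map (·.2)).getLastD 0 = y := by
                rw [List.getLastD_eq_getLast?, hy]; rfl
              rw [hpe, hye, hgp, hgy]
              simp only [Option.map_some, Bool.or_false, Bool.false_eq_true, if_false]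
              rw [show ((header :: rest).foldl (pvRowStepA ((p : Int) + 1) (y : Int))
                    ((none, none), (none, none), (none, none))).1 = _ from foldA_fst _ _ _ _,
                  show ((header :: rest).foldl (pvRowStepA ((p : Int) + 1) (y : Int))
                    ((none, none), (none, none), (none, none))).2.1 = _ from foldA_snd _ _ _ _,
                  show ((header :: rest).foldl (pvRowStepA ((p : Int) + 1) (y : Int))
                    ((none, none), (none, none), (none, none))).2.2 = _ from foldA_thd _ _ _ _,
                  foldl_last_match, foldl_last_match, foldl_last_match]
              have hcast : ((p : Int) + 1) = ((p + 1 : Nat) : Int) := by push_cast; ring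
              have hKR : pvKeysR.map PySem.Str.lower = pvRT.map (fun q => PySem.Str.lower q.1) := by rfl
              have hKO : pvKeysO.map PySem.Str.lower = pvOPT.map (fun q => PySem.Str.lower q.1) := by rfl
              have hKN : pvKeysN.map PySem.Str.lower = pvNPT.map (fun q => PySem.Str.lower q.1) := by rfl
              simp only [pvLastRow, List.map_cons, List.map_nil, hKR, hKO, hKN]
              cases hr : (header :: rest).reverse.find? (pvMatchesRow (pvRT.map (fun q => PySem.Str.lower q.1))) <;>
              cases ho : (header :: rest).reverse.find? (pvMatchesRow (pvOPT.map (fun q => PySem.Str.lower q.1))) <;>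
              cases hn : (header :: rest).reverse.find? (pvMatchesRow (pvNPT.map (fun q => PySem.Str.lower q.1))) <;>
              simp only [Option.elim_none, Option.elim_some, hcast, pvCell_natCast]
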